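-- pv_equiv track=rewrite | github.com/Ilippy/Python_Dive_Lesson3 | main.py | every_one_have_except_one_v3
-- ===== SOURCE A (Python) =====
-- def every_one_have_except_one_v3(tour: dict) -> dict:
--     result = {}
--     for full_name, bag in tour.items():
--         temp_set = set()
--         for name, items in tour.items():
--             if full_name != name:
--                 temp_set = temp_set & set(items) if temp_set else set(items)
--         temp_set -= set(bag)
--         for i in temp_set:
--             result[i] = full_name
--     return result
-- ===== SOURCE B (Python) =====
-- def every_one_have_except_one_v3(tour: dict) -> dict:
--     names = list(tour)
--     bags = [set(v) for v in tour.values()]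
--     n = len(names)
--     # prefix reset-intersections: pre[j] = running intersection (with A-style
--     # restart-on-empty semantics) of bags[0..j-1]
--     pre = [set()]
--     for s in bags:
--         acc = pre[-1]
--         pre.append(acc & s if acc else s)
--     result = {}
--     for j in range(n):
--         acc = pre[j]
--         for s in bags[j + 1:]:
--             acc = acc & s if acc else s
--         for i in acc - bags[j]:
--             result[i] = names[j]
--     return result
-- ===== Notes on version B (the rewrite author's own statement) =====
-- stated objective: faster
-- what changed: B builds each bag's set once and a prefix table of running (restart-on-empty) intersections, so each person's result is obtained by continuing the fold only over the later bags, instead of A's full rescan over all entries with set(items) rebuilt every time.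
import Mathlib
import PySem

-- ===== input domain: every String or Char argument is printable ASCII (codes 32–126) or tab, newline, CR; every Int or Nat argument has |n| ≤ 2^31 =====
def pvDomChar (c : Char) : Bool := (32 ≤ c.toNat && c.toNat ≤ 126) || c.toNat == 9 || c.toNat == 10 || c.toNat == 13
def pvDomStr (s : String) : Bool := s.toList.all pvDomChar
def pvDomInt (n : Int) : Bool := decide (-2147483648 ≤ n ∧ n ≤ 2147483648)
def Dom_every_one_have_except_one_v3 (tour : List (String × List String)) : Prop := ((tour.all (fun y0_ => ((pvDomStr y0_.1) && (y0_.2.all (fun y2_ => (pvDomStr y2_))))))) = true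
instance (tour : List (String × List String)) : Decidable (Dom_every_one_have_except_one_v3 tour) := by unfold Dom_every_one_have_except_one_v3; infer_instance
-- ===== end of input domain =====

-- B replaces A's per-person rescan over all entries (rebuilding every bag's set each time)
-- by bag sets built once plus a prefix table of the running intersections, so each person
-- only folds over the suffix of later bags (same return value; objective: faster).

-- ===== PORT A =====
def every_one_have_except_one_v3 (tour : List (String × List String)) : List (String × String) :=
  (tour.foldl
    (fun (result : PySem.Dict String String) entry =>
      let tempSet : PySem.Set String :=
        tour.foldl
          (fun (t : PySem.Set String) e =>
            if entry.1 != e.1 then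
              (if t.isEmpty then PySem.Set.ofList e.2
               else PySem.Set.inter t (PySem.Set.ofList e.2))
            else t)
          PySem.Set.empty
      let temp2 := PySem.Set.diff tempSet (PySem.Set.ofList entry.2)
      temp2.foldl (fun r i => r.insert i entry.1) result)
    PySem.Dict.empty).items

-- ===== PORT B =====
def every_one_have_except_one_v3_alt (tour : List (String × List String)) : List (String × String) :=
  let names := tour.map Prod.fst
  let bags := tour.map (fun e => PySem.Set.ofList e.2)
  let n : Int := names.length
  let pre : List (PySem.Set String) :=
    bags.foldl
      (fun p s =>
        let acc := PySem.List.pyGetD p (-1) PySem.Set.empty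
        p ++ [if acc.isEmpty then s else PySem.Set.inter acc s])
      [PySem.Set.empty]
  ((PySem.List.pyRange 0 n 1).foldl
    (fun (result : PySem.Dict String String) j =>
      let acc :=
        (PySem.List.slice bags (some (j + 1)) none).foldl
          (fun a s => if a.isEmpty then s else PySem.Set.inter a s)
          (PySem.List.pyGetD pre j PySem.Set.empty)
      let items := PySem.Set.diff acc (PySem.List.pyGetD bags j PySem.Set.empty)
      items.foldl (fun r i => r.insert i (PySem.List.pyGetD names j "")) result)
    PySem.Dict.empty).items

-- ===== PRECONDITION & SPEC =====
-- Pre_ excludes association lists with duplicate person names, which cannot arise from A's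
-- Python dict argument: A's name-based filter and B's index-based removal of the current
-- person agree only when the names are distinct.
def Pre_every_one_have_except_one_v3 (tour : List (String × List String)) : Prop :=
  (tour.map Prod.fst).Nodup
instance (tour : List (String × List String)) : Decidable (Pre_every_one_have_except_one_v3 tour) := by
  unfold Pre_every_one_have_except_one_v3; infer_instance

def pvWitness_every_one_have_except_one_v3 : (List (String × List String)) :=
  [("Alice", ["pen", "map"]), ("Bob", ["map"]), ("Carl", ["map", "pen"])]

def Spec_every_one_have_except_one_v3 (tour : List (String × List String)) (out : List (String × String)) : Prop := out = every_one_have_except_one_v3_alt tour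
instance (tour : List (String × List String)) (out : List (String × String)) : Decidable (Spec_every_one_have_except_one_v3 tour out) := by unfold Spec_every_one_have_except_one_v3; infer_instance

-- ===== CLAIM (what is proved, stated in full; the proofs are below) =====
def Claim_equal_every_one_have_except_one_v3 : Prop := ∀ (tour : List (String × List String)), Dom_every_one_have_except_one_v3 tour → Pre_every_one_have_except_one_v3 tour → Spec_every_one_have_except_one_v3 tour (every_one_have_except_one_v3 tour)

-- ===== LEMMAS AND PROOFS =====

-- the one-step "intersect, restarting from the bag when the accumulator is empty"
def pvStep (a s : PySem.Set String) : PySem.Set String :=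
  if a.isEmpty then s else PySem.Set.inter a s

-- common normal form of both ports: per index k, continue the prefix fold over the suffix
def pvMid (tour : List (String × List String)) : List (String × String) :=
  ((List.range tour.length).foldl
    (fun (r : PySem.Dict String String) k =>
      let entry := tour.getD k ("", [])
      let temp := PySem.Set.diff
        (((tour.drop (k + 1)).map (fun e => PySem.Set.ofList e.2)).foldl pvStep
          (((tour.take k).map (fun e => PySem.Set.ofList e.2)).foldl pvStep PySem.Set.empty))
        (PySem.Set.ofList entry.2)
      temp.foldl (fun r i => r.insert i entry.1) r)
    PySem.Dict.empty).items

-- B's prefix-table builder only inspects the last element and appends: it is a scanl.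
lemma pvFoldAppend (l : List (PySem.Set String)) (p : List (PySem.Set String)) (acc : PySem.Set String) :
    l.foldl (fun p s =>
        p ++ [if (PySem.List.pyGetD p (-1) PySem.Set.empty).isEmpty then s
              else PySem.Set.inter (PySem.List.pyGetD p (-1) PySem.Set.empty) s]) (p ++ [acc])
      = p ++ List.scanl pvStep acc l := by
  induction l generalizing p acc with
  | nil => simp
  | cons s l ih =>
    simp only [List.foldl_cons, List.scanl_cons, PySem.List.pyGetD_neg_one_append_singleton]
    rw [ih (p ++ [acc]) (if acc.isEmpty then s else PySem.Set.inter acc s)]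
    simp [pvStep]

lemma pvScanlGetD (l : List (PySem.Set String)) (b : PySem.Set String) (k : Nat) (hk : k ≤ l.length) :
    (List.scanl pvStep b l).getD k PySem.Set.empty = (l.take k).foldl pvStep b := by
  induction l generalizing b k with
  | nil => simp at hk; subst hk; simp
  | cons s l ih =>
    cases k with
    | zero => simp
    | succ k =>
      simp only [List.scanl_cons, List.getD_cons_succ, List.take_succ_cons, List.foldl_cons]
      exact ih (pvStep b s) k (by simpa using hk)

-- a fold over a list rewritten as a fold over its indices
lemma pvFoldIndex {α β : Type} (l : List α) (f : β → α → β) (d : α) (r : β) :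
    l.foldl f r = (List.range l.length).foldl (fun r k => f r (l.getD k d)) r := by
  induction l using List.reverseRecOn generalizing r with
  | nil => simp
  | append_singleton l e ih =>
    rw [List.foldl_append, ih, List.length_append, List.length_singleton,
        List.range_succ, List.foldl_append]
    simp only [List.foldl_cons, List.foldl_nil]
    rw [PySem.List.foldl_congr_mem (List.range l.length)
      (fun r k => f r (l.getD k d)) (fun r k => f r ((l ++ [e]).getD k d)) r ?_]
    · congr 1
      simp
    · intro acc k hk
      rw [List.mem_range] at hk
      simp only []; rw [List.getD, List.getD, List.getElem?_append_left hk]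

-- A's guarded inner loop is a fold over the filtered entry list
lemma pvGuardFold (nm : String) (l : List (String × List String)) (init : PySem.Set String) :
    l.foldl (fun t e =>
        if nm != e.1 then
          (if t.isEmpty then PySem.Set.ofList e.2
           else PySem.Set.inter t (PySem.Set.ofList e.2))
        else t) init
      = (l.filter (fun e => nm != e.1)).foldl (fun t e => pvStep t (PySem.Set.ofList e.2)) init := by
  rw [List.foldl_filter]
  rfl

-- with distinct names, A's name-based filter removes exactly the current entry
lemma pvFilterNe (tour : List (String × List String)) (h : (tour.map Prod.fst).Nodup)
    (k : Nat) (hk : k < tour.length) :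
    tour.filter (fun e => tour[k].1 != e.1) = tour.take k ++ tour.drop (k + 1) := by
  obtain ⟨x, hx⟩ : ∃ x, tour[k] = x := ⟨_, rfl⟩
  have key : ∀ i (hi : i < tour.length), tour[i].1 = x.1 → i = k := by
    intro i hi heq
    have h' : (List.map Prod.fst tour)[i]'(by simpa using hi)
        = (List.map Prod.fst tour)[k]'(by simpa using hk) := by
      simp [heq, hx]
    exact (List.Nodup.getElem_inj_iff h).mp h'
  have hsplit : tour = tour.take k ++ tour[k] :: tour.drop (k + 1) := by
    conv_lhs => rw [← List.take_append_drop k tour]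
    rw [List.drop_eq_getElem_cons hk]
  rw [hx] at hsplit ⊢
  conv_lhs => rw [hsplit]
  rw [List.filter_append, List.filter_cons]
  simp only [bne_self_eq_false, Bool.false_eq_true, ite_false]
  congr 1
  · apply List.filter_eq_self.mpr
    intro e he
    obtain ⟨i, hi, hie⟩ := List.getElem_of_mem he
    have hi' : i < k := by simp at hi; omega
    rw [List.getElem_take] at hie
    simp only [bne_iff_ne, ne_eq]
    intro heq
    have := key i (by omega) (by rw [hie, heq])
    omega
  · apply List.filter_eq_self.mpr
    intro e he
    obtain ⟨i, hi, hie⟩ := List.getElem_of_mem he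
    have hilen : k + 1 + i < tour.length := by simp at hi; omega
    rw [List.getElem_drop] at hie
    simp only [bne_iff_ne, ne_eq]
    intro heq
    have := key (k + 1 + i) hilen (by rw [hie, heq])
    omega

lemma pvAeq (tour : List (String × List String)) (h : (tour.map Prod.fst).Nodup) :
    every_one_have_except_one_v3 tour = pvMid tour := by
  unfold every_one_have_except_one_v3 pvMid
  congr 1
  rw [pvFoldIndex tour _ ("", []) PySem.Dict.empty]
  apply PySem.List.foldl_congr_mem
  intro r k hk
  rw [List.mem_range] at hk
  simp only [List.getD_eq_getElem tour ("", []) hk]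
  rw [pvGuardFold, pvFilterNe tour h k hk, List.foldl_append, List.foldl_map, List.foldl_map]

lemma pvBeq (tour : List (String × List String)) :
    every_one_have_except_one_v3_alt tour = pvMid tour := by
  unfold every_one_have_except_one_v3_alt pvMid
  simp only [List.length_map]
  rw [show ([PySem.Set.empty] : List (PySem.Set String)) = [] ++ [PySem.Set.empty] from rfl,
      pvFoldAppend, List.nil_append]
  rw [PySem.List.pyRange_zero_nat, List.foldl_map]
  congr 1
  apply PySem.List.foldl_congr_mem
  intro r k hk
  rw [List.mem_range] at hk
  have hk' : (k : Int) + 1 = ((k + 1 : Nat) : Int) := by push_cast; ring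
  rw [hk', PySem.List.slice_from_natCast]
  simp only [PySem.List.pyGetD_natCast]
  rw [pvScanlGetD _ _ k (by simpa using Nat.le_of_lt hk)]
  rw [← List.map_take, ← List.map_drop]
  have e1 : (List.map Prod.fst tour).getD k "" = tour[k].1 := by
    rw [List.getD_eq_getElem _ _ (by simpa using hk), List.getElem_map]
  have e2 : (List.map (fun e => PySem.Set.ofList e.2) tour).getD k PySem.Set.empty
      = PySem.Set.ofList tour[k].2 := by
    rw [List.getD_eq_getElem _ _ (by simpa using hk), List.getElem_map]
  rw [e1, e2, List.getD_eq_getElem tour ("", []) hk]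
  rfl

-- ===== VERDICT (by name: the statement is the Claim_ definition above) =====
theorem every_one_have_except_one_v3_spec : Claim_equal_every_one_have_except_one_v3 := by
  intro tour _ hpre
  unfold Spec_every_one_have_except_one_v3
  unfold Pre_every_one_have_except_one_v3 at hpre
  rw [pvAeq tour hpre, pvBeq]
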